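-- pv_equiv track=rewrite | github.com/mortyc126-debug/rayon | src/closing_proofs.py | compute_gate_reach
-- ===== SOURCE A (Python) =====
-- def compute_gate_reach(gates, n):
--     """Для каждого входа x_i: сколько гейтов достижимо от x_i?
--     Если reach(x_i) = r_i, то фиксация x_i потенциально
--     определяет r_i гейтов."""
--     # Строим DAG: out → {inputs}
--     children = {}  # wire → list of gates using it as input
--     for g in gates:
--         for inp in [g[1], g[2]]:
--             if inp >= 0:
--                 if inp not in children:
--                     children[inp] = []
--                 children[inp].append(g[3])
--
--     reach = {}
--     for i in range(n):
--         visited = set()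
--         stack = [i]
--         while stack:
--             w = stack.pop()
--             if w in visited: continue
--             visited.add(w)
--             for c in children.get(w, []):
--                 stack.append(c)
--         reach[i] = len(visited) - 1  # exclude self
--     return reach
-- ===== SOURCE B (Python) =====
-- def compute_gate_reach(gates, n):
--     """Same result as A: for each input wire i in range(n), the number of
--     gates reachable from i (excluding i itself)."""
--     children = {}
--     for g in gates:
--         a, b, out = g[1], g[2], g[3]
--         if a >= 0:
--             children.setdefault(a, []).append(out)
--         if b >= 0:
--             children.setdefault(b, []).append(out)
--
--     reach = {}
--     for i in range(n):
--         # breadth-first saturation by frontiers instead of an explicit DFS stack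
--         visited = {i}
--         frontier = {i}
--         while frontier:
--             frontier = {c for w in frontier for c in children.get(w, [])} - visited
--             visited |= frontier
--         reach[i] = len(visited) - 1
--     return reach
-- ===== Notes on version B (the rewrite author's own statement) =====
-- stated objective: alternative
-- what changed: Per input wire, A's explicit-stack DFS with a visited guard is replaced by a breadth-first frontier saturation: repeatedly expand only the newest frontier through the adjacency map and union the new nodes into the visited set until no new node appears.
-- outside the precondition, e.g. on compute_gate_reach([[0, -1, -2]], 1): A returns {0: 0}, B raises IndexError
import Mathlib
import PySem

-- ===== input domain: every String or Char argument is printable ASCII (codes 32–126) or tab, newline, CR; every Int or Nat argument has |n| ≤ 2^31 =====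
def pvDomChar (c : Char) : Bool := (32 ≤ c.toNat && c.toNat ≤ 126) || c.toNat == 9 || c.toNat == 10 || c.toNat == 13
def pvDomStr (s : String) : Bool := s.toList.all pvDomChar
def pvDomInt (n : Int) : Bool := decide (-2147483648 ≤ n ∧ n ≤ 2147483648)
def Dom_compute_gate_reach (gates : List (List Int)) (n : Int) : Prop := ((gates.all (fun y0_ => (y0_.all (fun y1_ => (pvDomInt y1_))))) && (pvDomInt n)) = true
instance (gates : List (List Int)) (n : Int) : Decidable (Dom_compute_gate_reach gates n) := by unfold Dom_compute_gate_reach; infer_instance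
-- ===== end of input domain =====

-- B replaces A's per-input explicit-stack DFS by a per-input breadth-first frontier
-- saturation (repeatedly expand the newest frontier through the adjacency and union it
-- into the visited set); same return value, similar cost (objective: alternative).

-- ===== PORT A =====

-- helper lemmas cited by the ports' termination proofs (decreasing_by) --

theorem pv_filter_len_le (U : List Int) (p q : Int → Bool)
    (h : ∀ x ∈ U, p x = true → q x = true) :
    (U.filter p).length ≤ (U.filter q).length := by
  rw [← List.countP_eq_length_filter, ← List.countP_eq_length_filter]
  exact List.countP_mono_left h

theorem pv_filter_len_lt (U : List Int) (p q : Int → Bool)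
    (h : ∀ x ∈ U, p x = true → q x = true)
    (v : Int) (hv : v ∈ U) (hpv : p v = false) (hqv : q v = true) :
    (U.filter p).length < (U.filter q).length := by
  induction U with
  | nil => cases hv
  | cons x t ih =>
    have ht : ∀ y ∈ t, p y = true → q y = true := fun y hy => h y (List.mem_cons_of_mem x hy)
    have hle := pv_filter_len_le t p q ht
    rcases List.mem_cons.mp hv with rfl | hvt
    · rw [List.filter_cons, List.filter_cons, hpv, hqv]
      simpa using Nat.lt_succ_of_le hle
    · have hlt := ih ht hvt
      rw [List.filter_cons, List.filter_cons]
      cases hp : p x <;> cases hq : q x <;> simp <;> try omega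
      exact absurd (h x List.mem_cons_self hp) (by simp [hq])

theorem pv_sum_filter_ne (f : Int → Nat) (M : List Int) (w : Int) (hw : w ∈ M) :
    ((M.filter (fun k => decide (k ≠ w))).map f).sum + f w ≤ (M.map f).sum := by
  induction M with
  | nil => cases hw
  | cons x t ih =>
    have hsub : ((t.filter (fun k => decide (k ≠ w))).map f).sum ≤ (t.map f).sum := by
      refine List.Sublist.sum_le_sum ?_ (fun a _ => Nat.zero_le a)
      exact (List.filter_sublist).map f
    rcases eq_or_ne x w with rfl | hx
    · rw [List.filter_cons_of_neg (by simp)]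
      simp only [List.map_cons, List.sum_cons]
      omega
    · rw [List.filter_cons_of_pos (by simp [hx])]
      simp only [List.map_cons, List.sum_cons]
      rcases List.mem_cons.mp hw with rfl | hwt
      · exact absurd rfl hx
      · have := ih hwt
        omega

theorem pvDfs_measure_lt (children : PySem.Dict Int (List Int)) (visited : PySem.Set Int)
    (w : Int) (rest : List Int) (hw : w ∉ visited) :
    ((children.keys.filter (fun k => decide (k ∉ PySem.Set.add visited w))).map
        (fun k => (children.getD k []).length)).sum
      + ((children.getD w []).reverse ++ rest).length
    < ((children.keys.filter (fun k => decide (k ∉ visited))).map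
        (fun k => (children.getD k []).length)).sum
      + (w :: rest).length := by
  by_cases hwk : w ∈ children.keys
  · -- w has an adjacency entry: its contribution leaves the sum, its children enter the stack
    have hfil : children.keys.filter (fun k => decide (k ∉ PySem.Set.add visited w))
        = (children.keys.filter (fun k => decide (k ∉ visited))).filter
            (fun k => decide (k ≠ w)) := by
      rw [List.filter_filter]
      refine List.filter_congr (fun k _ => ?_)
      simp only [← Bool.decide_and, decide_eq_decide,
        PySem.Set.mem_add visited w k]
      tauto
    have hwM : w ∈ children.keys.filter (fun k => decide (k ∉ visited)) := by
      simp [List.mem_filter, hwk, hw]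
    have hsum := pv_sum_filter_ne (fun k => (children.getD k []).length)
      (children.keys.filter (fun k => decide (k ∉ visited))) w hwM
    rw [hfil]
    beta_reduce at hsum
    simp only [List.length_append, List.length_reverse, List.length_cons]
    omega
  · -- w has no adjacency entry: nothing is pushed and the sum is unchanged
    have hcw : children.getD w [] = [] := by
      apply PySem.Dict.getD_of_not_contains
      by_contra hc
      have : children.contains w = true := by
        cases h : children.contains w
        · exact absurd h hc
        · rfl
      exact hwk ((PySem.Dict.contains_iff_mem_keys children w).mp this)
    have hfil : children.keys.filter (fun k => decide (k ∉ PySem.Set.add visited w))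
        = children.keys.filter (fun k => decide (k ∉ visited)) := by
      refine List.filter_congr (fun k hk => ?_)
      have hkw : k ≠ w := fun h => hwk (h ▸ hk)
      simp only [decide_eq_decide, PySem.Set.mem_add visited w k]
      tauto
    rw [hfil, hcw]
    simp

-- children-building loop of A: 'if inp not in children: children[inp] = []' followed by
-- 'children[inp].append(g[3])' is exactly d[inp] = d.get(inp, []) ++ [g[3]], i.e. Dict.modify.
def pvChildrenA (gates : List (List Int)) : PySem.Dict Int (List Int) :=
  gates.foldl (fun d g =>
    match PySem.List.pyGet? g 1, PySem.List.pyGet? g 2 with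
    | some a, some b =>
        [a, b].foldl (fun d inp =>
          if 0 ≤ inp then
            match PySem.List.pyGet? g 3 with
            | some o => d.modify inp [] (· ++ [o])
            | none => d
          else d) d
    | _, _ => d) PySem.Dict.empty

-- the 'while stack' DFS loop of A; the stack is kept top-first (Python appends and pops
-- at the END of the list, so pushing children.get(w, []) pops them in reversed order).
def pvDfs (children : PySem.Dict Int (List Int)) (visited : PySem.Set Int)
    (stack : List Int) : PySem.Set Int :=
  match stack with
  | [] => visited
  | w :: rest =>
    if w ∈ visited then pvDfs children visited rest
    else pvDfs children (PySem.Set.add visited w) ((children.getD w []).reverse ++ rest)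
termination_by
  ((children.keys.filter (fun k => decide (k ∉ visited))).map
      (fun k => (children.getD k []).length)).sum + stack.length
decreasing_by
  · simp only [List.length_cons]; omega
  · exact pvDfs_measure_lt children visited w rest (by assumption)

def compute_gate_reach (gates : List (List Int)) (n : Int) : List (Int × Int) :=
  let children := pvChildrenA gates
  ((PySem.List.pyRange 0 n 1).foldl
    (fun reach i =>
      reach.insert i (PySem.Set.len (pvDfs children PySem.Set.empty [i]) - 1))
    PySem.Dict.empty).items

-- ===== PORT B =====

-- termination helper for B's saturation loop --
theorem pvBfs_measure_lt (children : PySem.Dict Int (List Int)) (visited : PySem.Set Int)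
    (f0 : Int) (fr : List Int) :
    (letI nf := PySem.Set.diff
        (PySem.Set.ofList ((f0 :: fr).flatMap (fun w => children.getD w []))) visited
     2 * ((children.values.flatten.dedup).filter
            (fun v => decide (v ∉ PySem.Set.union visited nf))).length
       + (if (nf : List Int) = [] then 0 else 1))
    < 2 * ((children.values.flatten.dedup).filter
            (fun v => decide (v ∉ visited))).length + 1 := by
  set nf := PySem.Set.diff
      (PySem.Set.ofList ((f0 :: fr).flatMap (fun w => children.getD w []))) visited with hnf
  have hmono : ∀ x ∈ children.values.flatten.dedup,
      decide (x ∉ PySem.Set.union visited nf) = true → decide (x ∉ visited) = true := by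
    intro x _ hx
    simp only [decide_eq_true_eq] at hx ⊢
    exact fun hv => hx ((PySem.Set.mem_union visited nf x).mpr (Or.inl hv))
  by_cases h0 : (nf : List Int) = []
  · simp [h0]
  · obtain ⟨v, hvnf⟩ := List.exists_mem_of_ne_nil _ h0
    have hvd := (PySem.Set.mem_diff _ _ v).mp hvnf
    have hvfl : v ∈ (f0 :: fr).flatMap (fun w => children.getD w []) :=
      (PySem.Set.mem_ofList _ v).mp hvd.1
    obtain ⟨w, _, hvw⟩ := List.mem_flatMap.mp hvfl
    have hvU : v ∈ children.values.flatten.dedup := by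
      rw [List.mem_dedup, List.mem_flatten]
      cases hg : children.get? w with
      | none =>
        rw [PySem.Dict.getD_eq_get?_getD, hg] at hvw
        cases hvw
      | some l =>
        refine ⟨l, ?_, ?_⟩
        · have := PySem.Dict.mem_items_of_get?_eq_some children hg
          simp only [PySem.Dict.values]
          exact List.mem_map_of_mem this
        · rwa [PySem.Dict.getD_eq_get?_getD, hg] at hvw
    have hlt := pv_filter_len_lt (children.values.flatten.dedup) _ _ hmono v hvU
      (by simp [(PySem.Set.mem_union visited nf v).mpr (Or.inr hvnf)])
      (by simp [hvd.2])
    rw [if_neg h0]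
    omega

def pvChildrenB (gates : List (List Int)) : PySem.Dict Int (List Int) :=
  gates.foldl (fun d g =>
    match PySem.List.pyGet? g 1, PySem.List.pyGet? g 2, PySem.List.pyGet? g 3 with
    | some a, some b, some o =>
        let d1 := if 0 ≤ a then d.modify a [] (· ++ [o]) else d
        if 0 ≤ b then d1.modify b [] (· ++ [o]) else d1
    | _, _, _ => d) PySem.Dict.empty

-- the 'while frontier' breadth-first saturation loop of B
def pvBfs (children : PySem.Dict Int (List Int)) (visited frontier : PySem.Set Int) :
    PySem.Set Int :=
  match frontier with
  | [] => visited
  | f0 :: fr =>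
    let nf := PySem.Set.diff
      (PySem.Set.ofList ((f0 :: fr).flatMap (fun w => children.getD w []))) visited
    pvBfs children (PySem.Set.union visited nf) nf
termination_by
  2 * ((children.values.flatten.dedup).filter (fun v => decide (v ∉ visited))).length
    + (if (frontier : List Int) = [] then 0 else 1)
decreasing_by
  exact pvBfs_measure_lt children visited f0 fr

def compute_gate_reach_alt (gates : List (List Int)) (n : Int) : List (Int × Int) :=
  let children := pvChildrenB gates
  ((PySem.List.pyRange 0 n 1).foldl
    (fun reach i =>
      reach.insert i
        (PySem.Set.len
          (pvBfs children (PySem.Set.ofList [i]) (PySem.Set.ofList [i])) - 1))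
    PySem.Dict.empty).items

-- ===== PRECONDITION & SPEC =====
-- Pre_ excludes gate rows shorter than 4 entries: A generally raises IndexError on them,
-- and only accidentally returns when such a short row's two input fields are both
-- negative so its output field g[3] is never indexed (see claim cites).
def Pre_compute_gate_reach (gates : List (List Int)) (n : Int) : Prop :=
  ∀ g ∈ gates, 4 ≤ g.length
instance (gates : List (List Int)) (n : Int) : Decidable (Pre_compute_gate_reach gates n) := by
  unfold Pre_compute_gate_reach; infer_instance

def pvWitness_compute_gate_reach : List (List Int) × Int :=
  ([[5, 0, 1, 2], [6, 2, -1, 3]], 3)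

def Spec_compute_gate_reach (gates : List (List Int)) (n : Int) (out : List (Int × Int)) : Prop := out = compute_gate_reach_alt gates n
instance (gates : List (List Int)) (n : Int) (out : List (Int × Int)) : Decidable (Spec_compute_gate_reach gates n out) := by unfold Spec_compute_gate_reach; infer_instance

-- ===== CLAIM (what is proved, stated in full; the proofs are below) =====
def Claim_equal_compute_gate_reach : Prop := ∀ (gates : List (List Int)) (n : Int), Dom_compute_gate_reach gates n → Pre_compute_gate_reach gates n → Spec_compute_gate_reach gates n (compute_gate_reach gates n)

-- ===== LEMMAS AND PROOFS =====

theorem pv_children_eq (gates : List (List Int)) (hpre : ∀ g ∈ gates, 4 ≤ g.length) :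
    pvChildrenA gates = pvChildrenB gates := by
  unfold pvChildrenA pvChildrenB
  refine PySem.List.foldl_congr_mem gates _ _ PySem.Dict.empty (fun d g hg => ?_)
  have h4 := hpre g hg
  have h1 : PySem.List.pyGet? g 1 = some g[1] := PySem.List.pyGet?_ofNat g 1 (by omega)
  have h2 : PySem.List.pyGet? g 2 = some g[2] := PySem.List.pyGet?_ofNat g 2 (by omega)
  have h3 : PySem.List.pyGet? g 3 = some g[3] := PySem.List.pyGet?_ofNat g 3 (by omega)
  simp only [h1, h2, h3, List.foldl_cons, List.foldl_nil]

theorem pv_dfs_grow (ch : PySem.Dict Int (List Int)) (vis : PySem.Set Int) (stack : List Int)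
    (x : Int) (hx : x ∈ vis ∨ x ∈ stack) : x ∈ pvDfs ch vis stack := by
  fun_induction pvDfs ch vis stack with
  | case1 vis => simpa using hx
  | case2 vis w rest hmem ih =>
    apply ih
    rcases hx with hx | hx
    · exact Or.inl hx
    · rcases List.mem_cons.mp hx with rfl | hx
      · exact Or.inl hmem
      · exact Or.inr hx
  | case3 vis w rest hmem ih =>
    apply ih
    rcases hx with hx | hx
    · exact Or.inl ((PySem.Set.mem_add vis w x).mpr (Or.inl hx))
    · rcases List.mem_cons.mp hx with rfl | hx
      · exact Or.inl ((PySem.Set.mem_add vis x x).mpr (Or.inr rfl))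
      · exact Or.inr (List.mem_append_right _ hx)

theorem pv_dfs_closed (ch : PySem.Dict Int (List Int)) (vis : PySem.Set Int) (stack : List Int)
    (hinv : ∀ w ∈ vis, ∀ v ∈ ch.getD w [], v ∈ vis ∨ v ∈ stack) :
    ∀ w ∈ pvDfs ch vis stack, ∀ v ∈ ch.getD w [], v ∈ pvDfs ch vis stack := by
  revert hinv
  fun_induction pvDfs ch vis stack with
  | case1 vis =>
    intro hinv w hw v hv
    rcases hinv w hw v hv with h | h
    · exact h
    · cases h
  | case2 vis w rest hmem ih =>
    intro hinv
    apply ih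
    intro w' hw' v hv
    rcases hinv w' hw' v hv with h | h
    · exact Or.inl h
    · rcases List.mem_cons.mp h with rfl | h
      · exact Or.inl hmem
      · exact Or.inr h
  | case3 vis w rest hmem ih =>
    intro hinv
    apply ih
    intro w' hw' v hv
    rcases (PySem.Set.mem_add vis w w').mp hw' with hw' | rfl
    · rcases hinv w' hw' v hv with h | h
      · exact Or.inl ((PySem.Set.mem_add vis w v).mpr (Or.inl h))
      · rcases List.mem_cons.mp h with rfl | h
        · exact Or.inl ((PySem.Set.mem_add vis v v).mpr (Or.inr rfl))
        · exact Or.inr (List.mem_append_right _ h)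
    · exact Or.inr (List.mem_append_left _ (List.mem_reverse.mpr hv))

theorem pv_dfs_min (ch : PySem.Dict Int (List Int)) (vis : PySem.Set Int) (stack : List Int)
    (T : Int → Prop) (hT : ∀ w v, T w → v ∈ ch.getD w [] → T v)
    (hv : ∀ x ∈ vis, T x) (hs : ∀ x ∈ stack, T x) : ∀ x ∈ pvDfs ch vis stack, T x := by
  revert hv hs
  fun_induction pvDfs ch vis stack with
  | case1 vis => intro hv _; exact hv
  | case2 vis w rest hmem ih =>
    intro hv hs
    exact ih hv (fun x hx => hs x (List.mem_cons_of_mem w hx))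
  | case3 vis w rest hmem ih =>
    intro hv hs
    refine ih ?_ ?_
    · intro x hx
      rcases (PySem.Set.mem_add vis w x).mp hx with hx | rfl
      · exact hv x hx
      · exact hs x List.mem_cons_self
    · intro x hx
      rcases List.mem_append.mp hx with hx | hx
      · exact hT w x (hs w List.mem_cons_self) (List.mem_reverse.mp hx)
      · exact hs x (List.mem_cons_of_mem w hx)

theorem pv_dfs_nodup (ch : PySem.Dict Int (List Int)) (vis : PySem.Set Int) (stack : List Int)
    (h : List.Nodup vis) : (pvDfs ch vis stack).Nodup := by
  revert h
  fun_induction pvDfs ch vis stack with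
  | case1 vis => exact fun h => h
  | case2 vis w rest hmem ih => exact ih
  | case3 vis w rest hmem ih => exact fun h => ih (PySem.Set.nodup_add vis w h)

theorem pv_bfs_grow (ch : PySem.Dict Int (List Int)) (vis fr : PySem.Set Int)
    (x : Int) (hx : x ∈ vis) : x ∈ pvBfs ch vis fr := by
  revert hx
  fun_induction pvBfs ch vis fr with
  | case1 vis => exact fun h => h
  | case2 vis f0 fr nf ih =>
    intro hx
    exact ih ((PySem.Set.mem_union _ _ x).mpr (Or.inl hx))

theorem pv_bfs_closed (ch : PySem.Dict Int (List Int)) (vis fr : PySem.Set Int)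
    (hinv : ∀ w ∈ vis, w ∉ fr → ∀ v ∈ ch.getD w [], v ∈ vis) :
    ∀ w ∈ pvBfs ch vis fr, ∀ v ∈ ch.getD w [], v ∈ pvBfs ch vis fr := by
  revert hinv
  fun_induction pvBfs ch vis fr with
  | case1 vis =>
    intro hinv w hw v hv
    exact hinv w hw (by simp) v hv
  | case2 vis f0 fr nf ih =>
    intro hinv
    apply ih
    intro w hw hwnf v hv
    rcases (PySem.Set.mem_union _ _ w).mp hw with hwv | hwnf'
    · by_cases hwfr : w ∈ f0 :: fr
      · have hvfl : v ∈ (f0 :: fr).flatMap (fun w => ch.getD w []) :=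
          List.mem_flatMap.mpr ⟨w, hwfr, hv⟩
        by_cases hvv : v ∈ vis
        · exact (PySem.Set.mem_union _ _ v).mpr (Or.inl hvv)
        · refine (PySem.Set.mem_union _ _ v).mpr (Or.inr ?_)
          exact (PySem.Set.mem_diff _ _ v).mpr ⟨(PySem.Set.mem_ofList _ v).mpr hvfl, hvv⟩
      · exact (PySem.Set.mem_union _ _ v).mpr (Or.inl (hinv w hwv hwfr v hv))
    · exact absurd hwnf' hwnf

theorem pv_bfs_min (ch : PySem.Dict Int (List Int)) (vis fr : PySem.Set Int)
    (T : Int → Prop) (hT : ∀ w v, T w → v ∈ ch.getD w [] → T v)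
    (hv : ∀ x ∈ vis, T x) (hf : ∀ x ∈ fr, T x) : ∀ x ∈ pvBfs ch vis fr, T x := by
  revert hv hf
  fun_induction pvBfs ch vis fr with
  | case1 vis => intro hv _; exact hv
  | case2 vis f0 fr nf ih =>
    intro hv hf
    have hnf : ∀ x ∈ PySem.Set.diff
        (PySem.Set.ofList ((f0 :: fr).flatMap (fun w => ch.getD w []))) vis, T x := by
      intro x hx
      have hxfl := (PySem.Set.mem_ofList _ x).mp ((PySem.Set.mem_diff _ _ x).mp hx).1
      obtain ⟨w, hwfr, hxw⟩ := List.mem_flatMap.mp hxfl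
      exact hT w x (hf w hwfr) hxw
    refine ih ?_ hnf
    intro x hx
    rcases (PySem.Set.mem_union _ _ x).mp hx with hx | hx
    · exact hv x hx
    · exact hnf x hx

theorem pv_bfs_nodup (ch : PySem.Dict Int (List Int)) (vis fr : PySem.Set Int)
    (h : List.Nodup vis) : (pvBfs ch vis fr).Nodup := by
  revert h
  fun_induction pvBfs ch vis fr with
  | case1 vis => exact fun h => h
  | case2 vis f0 fr nf ih => exact fun h => ih (PySem.Set.nodup_union vis _ h)

theorem pv_len_eq (ch : PySem.Dict Int (List Int)) (i : Int) :
    PySem.Set.len (pvDfs ch PySem.Set.empty [i])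
      = PySem.Set.len (pvBfs ch (PySem.Set.ofList [i]) (PySem.Set.ofList [i])) := by
  have hiB : i ∈ pvBfs ch (PySem.Set.ofList [i]) (PySem.Set.ofList [i]) :=
    pv_bfs_grow ch _ _ i ((PySem.Set.mem_ofList [i] i).mpr (by simp))
  have hAB : ∀ x ∈ pvDfs ch PySem.Set.empty [i],
      x ∈ pvBfs ch (PySem.Set.ofList [i]) (PySem.Set.ofList [i]) := by
    refine pv_dfs_min ch _ _ _ ?_ ?_ ?_
    · intro w v hw hv
      refine pv_bfs_closed ch _ _ ?_ w hw v hv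
      intro w' hw' hnot _ _
      exact absurd hw' hnot
    · intro x hx; cases hx
    · intro x hx
      rcases List.mem_cons.mp hx with rfl | hx
      · exact hiB
      · cases hx
  have hBA : ∀ x ∈ pvBfs ch (PySem.Set.ofList [i]) (PySem.Set.ofList [i]),
      x ∈ pvDfs ch PySem.Set.empty [i] := by
    have hsingle : ∀ x ∈ PySem.Set.ofList [i], x ∈ pvDfs ch PySem.Set.empty [i] := by
      intro x hx
      have : x = i := by simpa using (PySem.Set.mem_ofList [i] x).mp hx
      subst this
      exact pv_dfs_grow ch _ _ x (Or.inr (by simp))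
    refine pv_bfs_min ch _ _ _ ?_ hsingle hsingle
    intro w v hw hv
    refine pv_dfs_closed ch _ _ ?_ w hw v hv
    intro w' hw'
    cases hw'
  have hnA : (pvDfs ch PySem.Set.empty [i]).Nodup := pv_dfs_nodup ch _ _ List.nodup_nil
  have hnB : (pvBfs ch (PySem.Set.ofList [i]) (PySem.Set.ofList [i])).Nodup :=
    pv_bfs_nodup ch _ _ (PySem.Set.nodup_ofList [i])
  have hperm := (List.perm_ext_iff_of_nodup hnA hnB).mpr (fun a => ⟨hAB a, hBA a⟩)
  simp only [PySem.Set.len, hperm.length_eq]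

-- ===== VERDICT (by name: the statement is the Claim_ definition above) =====
theorem compute_gate_reach_spec : Claim_equal_compute_gate_reach := by
  intro gates n _ hpre
  unfold Spec_compute_gate_reach compute_gate_reach compute_gate_reach_alt
  rw [pv_children_eq gates hpre]
  refine congrArg PySem.Dict.items ?_
  exact PySem.List.foldl_congr_mem (PySem.List.pyRange 0 n 1)
    (fun reach i => reach.insert i
      (PySem.Set.len (pvDfs (pvChildrenB gates) PySem.Set.empty [i]) - 1))
    (fun reach i => reach.insert i
      (PySem.Set.len (pvBfs (pvChildrenB gates) (PySem.Set.ofList [i]) (PySem.Set.ofList [i])) - 1))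
    PySem.Dict.empty
    (fun acc i _ => by simp only []; rw [pv_len_eq])
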